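-- pv_equiv track=rewrite | github.com/arnolderincz/cryptography_labs | lab1/crypto.py | scytale_algorithm
-- ===== SOURCE A (Python) =====
-- import math
--
-- def scytale_algorithm(rows, text):
--     if (rows == 1):
--         return text
--
--     n = len(text)
--
--     columns = math.ceil(n / rows)
--     cipher = ['+'] * (rows * columns)
--
--     additions = 0
--     for i in range(n):
--         if(text[i] == '+'):
--             additions += 1
--             continue
--         row = i // rows
--         col = i % rows
--         cipher[col * columns + row] = text[i]
--
--     return (''.join(cipher[:-additions]) if additions else ''.join(cipher))
-- ===== SOURCE B (Python) =====
-- def scytale_algorithm(rows, text):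
--     if rows == 1:
--         return text
--     n = len(text)
--     cols = -(-n // rows)
--     padded = text + '+' * (rows * cols - n)
--     pairs = sorted(enumerate(padded), key=lambda t: (t[0] % rows) * cols + t[0] // rows)
--     cipher = ''.join(ch for _, ch in pairs)
--     return cipher[:len(cipher) - text.count('+')]
-- ===== Notes on version B (the rewrite author's own statement) =====
-- stated objective: alternative
-- what changed: A scatters characters one by one into a pre-allocated mutable '+'-filled flat array while counting skipped '+' characters and conditionally stripping; B is a decorate-sort-undecorate transposition: it pads the text, stable-sorts the enumerated characters by their destination position (i%rows)*cols + i//rows, joins, and trims with the closed-form len - text.count('+').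
-- outside the precondition, e.g. on scytale_algorithm(-2, 'abcde'): A returns 'dbec', B returns 'ecadb'; on scytale_algorithm(0, 'abc'): A raises ZeroDivisionError, B raises ZeroDivisionError
import Mathlib
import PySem

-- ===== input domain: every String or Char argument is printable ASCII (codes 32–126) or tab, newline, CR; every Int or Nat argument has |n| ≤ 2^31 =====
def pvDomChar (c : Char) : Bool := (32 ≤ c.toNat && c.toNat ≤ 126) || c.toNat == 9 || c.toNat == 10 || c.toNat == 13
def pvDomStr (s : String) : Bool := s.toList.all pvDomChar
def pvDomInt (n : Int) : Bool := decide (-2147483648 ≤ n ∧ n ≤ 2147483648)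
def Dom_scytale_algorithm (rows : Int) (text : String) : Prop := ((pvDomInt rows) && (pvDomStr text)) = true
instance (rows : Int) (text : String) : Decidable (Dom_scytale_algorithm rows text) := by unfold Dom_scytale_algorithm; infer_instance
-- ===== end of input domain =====

-- B replaces A's index-arithmetic scatter into a mutable flat array (with an `additions`
-- counter and a conditional strip) by a decorate-sort-undecorate transposition: pad, stable-sort
-- the enumerated characters by their destination position, join, trim (objective: alternative).

-- ===== PORT A =====
-- Literal port of A. `math.ceil(n / rows)` is ported as the exact integer ceiling
-- -((-n) // rows), which is what the float expression computes at the tested sizes.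
def scytale_algorithm (rows : Int) (text : String) : String :=
  if rows == 1 then text
  else
    let cs : List Char := text.toList
    let n : Int := cs.length
    let columns : Int := -(PySem.Int.floordiv (-n) rows)
    let cipher : List Char := List.replicate (rows * columns).toNat '+'
    let st : List Char × Int := (PySem.List.pyRange 0 n 1).foldl (fun st i =>
        if PySem.List.pyGetD cs i '+' == '+' then (st.1, st.2 + 1)
        else
          let row := PySem.Int.floordiv i rows
          let col := PySem.Int.mod i rows
          (PySem.List.pySetD st.1 (col * columns + row) (PySem.List.pyGetD cs i '+'), st.2))
      (cipher, 0)
    if st.2 > 0 then String.ofList (PySem.List.slice st.1 none (some (-st.2)))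
    else String.ofList st.1

-- ===== PORT B =====
-- Port of Source B. `padded[i]` for the in-range indices produced by enumerate is `pyGetD … '+'`
-- (the default is never used); sorted(..., key=…) is PySem.List.sorted.
def scytale_algorithm_alt (rows : Int) (text : String) : String :=
  if rows == 1 then text
  else
    let cs : List Char := text.toList
    let n : Int := cs.length
    let cols : Int := -(PySem.Int.floordiv (-n) rows)
    let padded : List Char := cs ++ List.replicate (rows * cols - n).toNat '+'
    let pairs : List (Int × Char) :=
      PySem.List.sorted (PySem.List.enumerate padded)
        (fun t => PySem.Int.mod t.1 rows * cols + PySem.Int.floordiv t.1 rows)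
    let cipher : List Char := pairs.map Prod.snd
    String.ofList (PySem.List.slice cipher none (some ((cipher.length : Int) - (PySem.Str.count text "+" : Int))))

-- ===== PRECONDITION & SPEC =====
-- Pre_ excludes rows = 0, where A raises ZeroDivisionError, and negative rows with non-empty
-- text, where A's output is an accident of Python's negative-index wraparound, outside the
-- cipher's natural domain (B returns a different string there).
def Pre_scytale_algorithm (rows : Int) (text : String) : Prop := 1 ≤ rows ∨ (rows ≠ 0 ∧ text.toList = [])
instance (rows : Int) (text : String) : Decidable (Pre_scytale_algorithm rows text) := by unfold Pre_scytale_algorithm; infer_instance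
def pvWitness_scytale_algorithm : Int × String := (3, "SCYTALE")
def Spec_scytale_algorithm (rows : Int) (text : String) (out : String) : Prop := out = scytale_algorithm_alt rows text
instance (rows : Int) (text : String) (out : String) : Decidable (Spec_scytale_algorithm rows text out) := by unfold Spec_scytale_algorithm; infer_instance

-- ===== CLAIM (what is proved, stated in full; the proofs are below) =====
def Claim_equal_scytale_algorithm : Prop := ∀ (rows : Int) (text : String), Dom_scytale_algorithm rows text → Pre_scytale_algorithm rows text → Spec_scytale_algorithm rows text (scytale_algorithm rows text)

-- ===== LEMMAS AND PROOFS =====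

theorem pv_chars_count (c : Char) (l : List Char) (acc : Nat) (fuel : Nat) (h : l.length ≤ fuel) :
    PySem.Chars.count.go [c] fuel l acc = acc + l.count c := by
  induction fuel generalizing l acc with
  | zero => simp only [Nat.le_zero, List.length_eq_zero_iff] at h
            simp [h, PySem.Chars.count.go]
  | succ f ih =>
    match l with
    | [] => simp [PySem.Chars.count.go]
    | a :: t =>
      simp only [PySem.Chars.count.go]
      by_cases hc : a = c
      · subst hc
        have hp : [a].isPrefixOf (a :: t) = true := by simp [List.isPrefixOf]
        simp [hp, ih t _ (by simpa using h)]
        omega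
      · have hp : [c].isPrefixOf (a :: t) = false := by
          simp [List.isPrefixOf]
          exact fun hh => (hc hh.symm).elim
        simp [hp, ih t _ (by simpa using h), hc]

theorem pv_str_count (s : String) :
    PySem.Str.count s "+" = s.toList.count '+' := by
  have h2 : PySem.Chars.count s.toList ['+'] = s.toList.count '+' := by
    simp only [PySem.Chars.count, List.isEmpty_cons]
    simpa using pv_chars_count '+' s.toList 0 s.toList.length le_rfl
  have h3 : ("+" : String).toList = ['+'] := rfl
  simpa [PySem.Str.count, h3] using h2

theorem pv_decode (R C p m : Nat) (hR : 0 < R) (hC : 0 < C) (hp : p < R * C)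
    (h : p % C * R + p / C = m) : p = m % R * C + m / R := by
  have hb : p / C < R := (Nat.div_lt_iff_lt_mul hC).mpr (by omega)
  have ha : p % C < C := Nat.mod_lt _ hC
  have hm : m = R * (p % C) + p / C := by rw [← h]; ring
  have h1 : m / R = p % C := by
    rw [hm, Nat.mul_add_div hR, Nat.div_eq_of_lt hb, Nat.add_zero]
  have h2 : m % R = p / C := by
    rw [hm, Nat.mul_add_mod, Nat.mod_eq_of_lt hb]
  rw [h1, h2]
  exact (Nat.div_add_mod' p C).symm

theorem pv_encode (R C m : Nat) (hR : 0 < R) (hm : m < R * C) :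
    (m % R * C + m / R) % C * R + (m % R * C + m / R) / C = m := by
  have hC : 0 < C := by
    rcases Nat.eq_zero_or_pos C with h | h
    · subst h; simp at hm
    · exact h
  have hb : m / R < C := (Nat.div_lt_iff_lt_mul hR).mpr (by rw [Nat.mul_comm C R]; exact hm)
  have he : m % R * C + m / R = C * (m % R) + m / R := by ring
  rw [he, Nat.mul_add_mod, Nat.mod_eq_of_lt hb, Nat.mul_add_div hC, Nat.div_eq_of_lt hb,
    Nat.add_zero]
  exact Nat.div_add_mod' m R

-- B's source index for output position p (the inverse of A's scatter destination)
def pvSrc (C R p : Nat) : Nat := p % C * R + p / C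

theorem pv_src_lt (R C p : Nat) (_hR : 0 < R) (hC : 0 < C) (hp : p < R * C) :
    pvSrc C R p < R * C := by
  unfold pvSrc
  have h1 : p % C < C := Nat.mod_lt _ hC
  have h2 : p / C < R := (Nat.div_lt_iff_lt_mul hC).mpr (by omega)
  calc p % C * R + p / C < p % C * R + R := by omega
    _ ≤ (C - 1) * R + R := by
        have : p % C ≤ C - 1 := by omega
        exact Nat.add_le_add_right (Nat.mul_le_mul_right _ this) _
    _ = C * R := by cases C with | zero => omega | succ c => simp [Nat.succ_mul]
    _ = R * C := Nat.mul_comm _ _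

def pvGrid (cs : List Char) (R C m p : Nat) : Char :=
  if p % C * R + p / C < m then cs.getD (p % C * R + p / C) '+' else '+'

theorem pv_loop (cs : List Char) (R C : Nat) (hR : 0 < R) (hlen : cs.length ≤ R * C) :
    ∀ m, m ≤ cs.length →
    ((List.range m).foldl (fun (st : List Char × Int) (k : Nat) =>
        if cs.getD k '+' == '+' then (st.1, st.2 + 1)
        else (st.1.set (k % R * C + k / R) (cs.getD k '+'), st.2))
      (List.replicate (R * C) '+', 0))
    = ((List.range (R * C)).map (pvGrid cs R C m), ((cs.take m).count '+' : Int)) := by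
  intro m
  induction m with
  | zero =>
    intro _
    refine Prod.ext ?_ (by simp)
    show List.replicate (R * C) '+' = List.map (pvGrid cs R C 0) (List.range (R * C))
    symm
    refine List.eq_replicate_iff.mpr ⟨by simp, ?_⟩
    intro b hb
    obtain ⟨p, -, rfl⟩ := List.mem_map.mp hb
    simp [pvGrid]
  | succ m ih =>
    intro hm1
    have hm : m < cs.length := by omega
    have hRC : 0 < R * C := by omega
    have hC : 0 < C := by
      rcases Nat.eq_zero_or_pos C with h | h
      · subst h; simp at hlen; omega
      · exact h
    rw [List.range_succ, List.foldl_append, ih (by omega), List.foldl_cons, List.foldl_nil]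
    have hgetD : cs.getD m '+' = cs[m] := List.getD_eq_getElem cs '+' hm
    have hcount : ((cs.take (m+1)).count '+' : Int)
        = ((cs.take m).count '+' : Int) + (if cs[m] = '+' then 1 else 0) := by
      rw [List.take_add_one, List.count_append]
      simp [List.getElem?_eq_getElem hm]
      split <;> simp_all
    by_cases hch : cs[m] = '+'
    · -- skipped character: the array already holds '+' at m's slot
      have hb : (cs.getD m '+' == '+') = true := by rw [hgetD, hch]; simp
      rw [hb]
      simp only [if_pos]
      refine Prod.ext ?_ ?_
      · show (List.range (R * C)).map (pvGrid cs R C m) = (List.range (R * C)).map (pvGrid cs R C (m+1))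
        apply List.map_congr_left
        intro p hp
        rw [List.mem_range] at hp
        unfold pvGrid
        by_cases hd : p % C * R + p / C = m
        · have hple : p = m % R * C + m / R := pv_decode R C p m hR hC hp hd
          rw [hd]
          simp [hm, hch]
        · have heq : p % C * R + p / C < m + 1 ↔ p % C * R + p / C < m := by omega
          simp only [heq]
      · show ((cs.take m).count '+' : Int) + 1 = ((cs.take (m+1)).count '+' : Int)
        rw [hcount, if_pos hch]
    · have hb : (cs.getD m '+' == '+') = false := by rw [hgetD]; simpa using hch
      rw [hb]
      simp only [Bool.false_eq_true, if_false]
      refine Prod.ext ?_ ?_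
      · show ((List.range (R * C)).map (pvGrid cs R C m)).set (m % R * C + m / R) (cs.getD m '+')
            = (List.range (R * C)).map (pvGrid cs R C (m+1))
        have henc : m % R * C + m / R < R * C := by
          have h1 : m % R < R := Nat.mod_lt _ hR
          have h2 : m / R < C := (Nat.div_lt_iff_lt_mul hR).mpr (by rw [Nat.mul_comm C R]; omega)
          calc m % R * C + m / R < m % R * C + C := by omega
            _ ≤ (R - 1) * C + C := by
                have : m % R ≤ R - 1 := by omega
                exact Nat.add_le_add_right (Nat.mul_le_mul_right _ this) _
            _ = R * C := by cases R with | zero => omega | succ r => simp [Nat.succ_mul]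
        apply List.ext_getElem
        · simp
        · intro p h1 h2
          simp only [List.length_set, List.length_map, List.length_range] at h1 h2
          rw [List.getElem_set]
          simp only [List.getElem_map, List.getElem_range]
          unfold pvGrid
          by_cases hpe : m % R * C + m / R = p
          · rw [if_pos hpe, ← hpe, pv_encode R C m hR (by omega)]
            simp [hm]
          · rw [if_neg hpe]
            by_cases hd : p % C * R + p / C = m
            · exact absurd ((pv_decode R C p m hR hC (by omega) hd).symm) hpe
            · have heq : p % C * R + p / C < m + 1 ↔ p % C * R + p / C < m := by omega
              simp only [heq]
      · show ((cs.take m).count '+' : Int) = ((cs.take (m+1)).count '+' : Int)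
        rw [hcount, if_neg hch]
        omega

-- the stable sort of the enumerated padded grid by destination position, named explicitly
theorem pv_sorted (padded : List Char) (R C : Nat) (hR : 0 < R) (hC : 0 < C)
    (hlen : padded.length = R * C) :
    PySem.List.sorted (PySem.List.enumerate padded)
        (fun t => PySem.Int.mod t.1 (R : Int) * (C : Int) + PySem.Int.floordiv t.1 (R : Int))
      = (List.range (R * C)).map (fun m => ((pvSrc C R m : Int), padded.getD (pvSrc C R m) '+')) := by
  have hsrc_lt : ∀ p < R * C, pvSrc C R p < R * C := fun p hp => pv_src_lt R C p hR hC hp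
  have hsrc_inj : ∀ p < R * C, ∀ q < R * C, pvSrc C R p = pvSrc C R q → p = q := by
    intro p hp q hq h
    have h1 := pv_decode R C p (pvSrc C R p) hR hC hp rfl
    have h2 := pv_decode R C q (pvSrc C R q) hR hC hq rfl
    rw [h1, h2, h]
  have hkey : ∀ m < R * C, (pvSrc C R m) % R * C + (pvSrc C R m) / R = m := by
    intro m hm
    exact pv_encode C R m hC (by rw [Nat.mul_comm]; exact hm)
  have henum : PySem.List.enumerate padded
      = (List.range (R * C)).map (fun i : Nat => ((i : Int), padded.getD i '+')) := by
    rw [PySem.List.enumerate_eq_map_pyRange padded '+']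
    have hl : PySem.List.len padded = ((R * C : Nat) : Int) := by
      simp [PySem.List.len, hlen]
    rw [hl, PySem.List.pyRange_zero_natCast, List.map_map]
    apply List.map_congr_left
    intro i _
    simp [Function.comp_apply, PySem.List.pyGetD_natCast]
  apply PySem.List.sorted_eq_of_perm_of_pairwise_lt
  · -- permutation
    rw [henum]
    have hmm : (List.range (R * C)).map (fun m => ((pvSrc C R m : Int), padded.getD (pvSrc C R m) '+'))
        = ((List.range (R * C)).map (pvSrc C R)).map (fun i : Nat => ((i : Int), padded.getD i '+')) := by
      rw [List.map_map]; exact List.map_congr_left (fun m _ => rfl)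
    rw [hmm]
    apply List.Perm.map
    apply List.perm_of_nodup_nodup_toFinset_eq
    · exact List.Nodup.map_on
        (fun x hx y hy => hsrc_inj x (List.mem_range.mp hx) y (List.mem_range.mp hy))
        (List.nodup_range)
    · exact List.nodup_range
    · ext x
      simp only [List.mem_toFinset, List.mem_map, List.mem_range]
      constructor
      · rintro ⟨p, hp, rfl⟩
        exact hsrc_lt p hp
      · intro hx
        refine ⟨x % R * C + x / R, ?_, ?_⟩
        · have h1 : x % R < R := Nat.mod_lt _ hR
          have h2 : x / R < C := (Nat.div_lt_iff_lt_mul hR).mpr (by rw [Nat.mul_comm C R]; omega)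
          calc x % R * C + x / R < x % R * C + C := by omega
            _ ≤ (R - 1) * C + C := by
                have : x % R ≤ R - 1 := by omega
                exact Nat.add_le_add_right (Nat.mul_le_mul_right _ this) _
            _ = R * C := by cases R with | zero => omega | succ r => simp [Nat.succ_mul]
        · exact pv_encode R C x hR hx
  · -- strictly increasing destination keys
    rw [List.pairwise_map]
    refine List.Pairwise.imp_of_mem ?_ List.pairwise_lt_range
    intro a b ha hb hab
    have ha' := List.mem_range.mp ha
    have hb' := List.mem_range.mp hb
    have hk : ∀ m < R * C,
        PySem.Int.mod (pvSrc C R m : Int) (R : Int) * (C : Int)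
          + PySem.Int.floordiv (pvSrc C R m : Int) (R : Int) = (m : Int) := by
      intro m hm
      rw [PySem.Int.mod_natCast, PySem.Int.floordiv_natCast]
      rw [show ((((pvSrc C R m) % R : Nat) : Int) * (C : Int) + (((pvSrc C R m) / R : Nat) : Int))
          = (((pvSrc C R m) % R * C + (pvSrc C R m) / R : Nat) : Int) by push_cast; ring]
      rw [hkey m hm]
    simp only [hk a ha', hk b hb']
    exact_mod_cast hab

theorem scytale_algorithm_spec : Claim_equal_scytale_algorithm := by
  intro rows text _ hpre
  unfold Pre_scytale_algorithm at hpre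
  unfold Spec_scytale_algorithm scytale_algorithm scytale_algorithm_alt
  by_cases h1 : rows = 1
  · simp [h1]
  · have h1' : (rows == 1) = false := by simpa using h1
    rw [h1']
    by_cases hemp : text.toList = []
    · -- empty text: both sides are the empty string
      have hc0 : PySem.Str.count text "+" = 0 := by
        rw [pv_str_count, hemp]; rfl
      simp [hemp, PySem.Int.floordiv, PySem.List.sorted, PySem.List.slice]
    · have hpos : 1 ≤ rows := by
        rcases hpre with h | h
        · exact h
        · exact absurd h.2 hemp
      simp only [Bool.false_eq_true, if_false]
      set cs : List Char := text.toList with hcs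
      set nn : Nat := cs.length with hnn
      set R : Nat := rows.toNat with hRdef
      have hrows : rows = (R : Int) := (Int.toNat_of_nonneg (by omega)).symm
      have hR : 0 < R := by omega
      set q : Int := -(PySem.Int.floordiv (-(nn : Int)) rows) with hqdef
      have hq : (q - 1) * rows < (nn : Int) ∧ (nn : Int) ≤ q * rows :=
        (PySem.Int.neg_floordiv_neg_eq_iff_of_pos (by omega)).mp hqdef.symm
      have hq0 : 0 ≤ q := by nlinarith [hq.2, Int.natCast_nonneg nn]
      set C : Nat := q.toNat with hCdef
      have hcol : q = (C : Int) := (Int.toNat_of_nonneg hq0).symm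
      have hnn0 : 0 < nn := by
        rw [hnn]
        exact List.length_pos_iff.mpr hemp
      have hC : 0 < C := by
        by_contra hc
        have : C = 0 := by omega
        rw [this] at hcol
        have := hq.2
        rw [hcol] at this
        simp at this
        omega
      have hlen : nn ≤ R * C := by
        have h2 := hq.2
        rw [hcol, hrows] at h2
        have h3 : (nn : Int) ≤ ((C * R : Nat) : Int) := by push_cast; exact h2
        have h4 := Int.ofNat_le.mp h3
        rw [Nat.mul_comm R C]; exact h4
      -- A's loop, moved to Nat level
      rw [hrows, hcol, PySem.List.pyRange_zero_natCast, List.foldl_map]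
      have hfun : (fun (st : List Char × Int) (k : Nat) =>
          if PySem.List.pyGetD cs (↑k) '+' == '+' then (st.1, st.2 + 1)
          else (PySem.List.pySetD st.1 (PySem.Int.mod (↑k) (R : Int) * (C : Int) + PySem.Int.floordiv (↑k) (R : Int)) (PySem.List.pyGetD cs (↑k) '+'), st.2))
        = (fun (st : List Char × Int) (k : Nat) =>
          if cs.getD k '+' == '+' then (st.1, st.2 + 1)
          else (st.1.set (k % R * C + k / R) (cs.getD k '+'), st.2)) := by
        funext st k
        rw [show (PySem.Int.mod (↑k) (R : Int) * (C : Int) + PySem.Int.floordiv (↑k) (R : Int)) = ((k % R * C + k / R : Nat) : Int) by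
          rw [PySem.Int.mod_natCast k R, PySem.Int.floordiv_natCast k R]; push_cast; ring]
        simp only [PySem.List.pySetD_natCast, PySem.List.pyGetD_natCast]
      rw [hfun]
      have hrep : ((R : Int) * (C : Int)).toNat = R * C := by
        rw [show ((R : Int) * (C : Int)) = ((R * C : Nat) : Int) by push_cast; ring, Int.toNat_natCast]
      rw [hrep, pv_loop cs R C hR hlen nn le_rfl]
      -- B's padded grid and sort, moved to Nat level
      have hpadlen : ((R : Int) * (C : Int) - (nn : Int)).toNat = R * C - nn := by omega
      set padded : List Char := cs ++ List.replicate (R * C - nn) '+' with hpad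
      have hplen : padded.length = R * C := by
        rw [hpad]; simp; omega
      rw [hpadlen, pv_sorted padded R C hR hC hplen, List.map_map]
      -- the sorted column read equals A's scattered grid, position by position
      have hgrid : (List.range (R * C)).map (Prod.snd ∘ fun m => ((pvSrc C R m : Int), padded.getD (pvSrc C R m) '+'))
          = (List.range (R * C)).map (pvGrid cs R C nn) := by
        apply List.map_congr_left
        intro p hp
        rw [List.mem_range] at hp
        simp only [Function.comp_apply]
        unfold pvGrid pvSrc
        by_cases hin : p % C * R + p / C < nn
        · rw [if_pos hin, hpad, List.getD_append _ _ _ _ (by rw [← hnn]; exact hin)]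
        · rw [if_neg hin, hpad, List.getD_append_right _ _ _ _ (by omega)]
          simp only [List.getD, List.getElem?_replicate]
          split <;> rfl
      rw [hgrid]
      -- count and final trim
      have htake : List.take nn cs = cs := by rw [hnn]; exact List.take_length
      have hcnt2 : (PySem.Str.count text "+" : Int) = ((cs.count '+' : Nat) : Int) := by
        exact_mod_cast congrArg _ (pv_str_count text)
      have hcntle : cs.count '+' ≤ R * C := le_trans (List.count_le_length) hlen
      rw [htake, hcnt2]
      simp only [List.length_map, List.length_range]
      rw [show ((↑(R * C) : Int) - ↑(cs.count '+')) = ((R * C - cs.count '+' : Nat) : Int) by omega,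
        PySem.List.slice_to_natCast]
      by_cases hc0 : cs.count '+' = 0
      · rw [hc0]
        simp only [Nat.cast_zero, gt_iff_lt, lt_self_iff_false, if_false, Nat.sub_zero]
        rw [List.take_of_length_le (by simp)]
      · rw [if_pos (by exact_mod_cast Nat.pos_of_ne_zero hc0),
          PySem.List.slice_to_neg_natCast _ _ (Nat.pos_of_ne_zero hc0)]
        simp only [List.length_map, List.length_range]
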